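-- pv_equiv track=rewrite | github.com/pongsatron-tzp/OCR_pdf | pdf_unstruct.py | _split_by_page_heading
-- ===== SOURCE A (Python) =====
-- from typing import List, Dict, Any, Optional, Tuple, Set, Union
--
-- def _split_by_page_heading(md_text: str) -> List[str]:
--     lines = (md_text or "").splitlines()
--     chunks, cur = [], []
--     for ln in lines:
--         if ln.startswith("## Page ") and cur:
--             chunks.append("\n".join(cur).strip() + "\n")
--             cur = [ln]
--         else:
--             cur.append(ln)
--     if cur:
--         chunks.append("\n".join(cur).strip() + "\n")
--     return chunks
-- ===== SOURCE B (Python) =====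
-- from typing import List
--
-- def _split_by_page_heading(md_text: str) -> List[str]:
--     lines = (md_text or "").splitlines()
--     if not lines:
--         return []
--     bounds = [0] + [i for i, ln in enumerate(lines)
--                     if i > 0 and ln.startswith("## Page ")]
--     bounds.append(len(lines))
--     return ["\n".join(lines[a:b]).strip() + "\n"
--             for a, b in zip(bounds, bounds[1:])]
-- ===== Notes on version B (the rewrite author's own statement) =====
-- stated objective: alternative
-- what changed: Replaces A's stateful accumulate-and-flush loop (current-chunk buffer mutated per line) with a two-pass decomposition: first compute the list of boundary indices where page headings start, then build each chunk by slicing between consecutive boundaries and joining.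
import Mathlib
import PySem

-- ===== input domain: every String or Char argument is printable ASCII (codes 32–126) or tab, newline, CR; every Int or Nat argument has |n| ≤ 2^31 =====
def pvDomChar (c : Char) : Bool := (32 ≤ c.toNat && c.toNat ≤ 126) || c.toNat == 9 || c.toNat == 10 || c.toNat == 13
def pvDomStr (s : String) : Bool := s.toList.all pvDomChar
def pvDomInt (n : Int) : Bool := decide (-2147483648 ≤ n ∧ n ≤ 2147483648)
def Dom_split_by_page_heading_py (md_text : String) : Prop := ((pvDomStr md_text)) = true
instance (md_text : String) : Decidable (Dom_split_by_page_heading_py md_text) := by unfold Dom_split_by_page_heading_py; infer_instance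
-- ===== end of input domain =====

-- B replaces A's stateful accumulate-and-flush loop by a boundary-index pass followed by a
-- slice-and-join pass (objective: alternative decomposition, same cost).

-- ===== PORT A =====
-- literal transliteration of A's accumulate-and-flush loop
def split_by_page_heading_py (md_text : String) : List String :=
  let lines := PySem.Str.splitlines (if md_text == "" then "" else md_text)
  let st := lines.foldl
    (fun (st : List String × List String) ln =>
      if PySem.Str.startswith ln "## Page " && !st.2.isEmpty then
        (st.1 ++ [PySem.Str.strip (PySem.Str.join "\n" st.2) ++ "\n"], [ln])
      else
        (st.1, st.2 ++ [ln])) ([], [])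
  if !st.2.isEmpty then st.1 ++ [PySem.Str.strip (PySem.Str.join "\n" st.2) ++ "\n"] else st.1

-- ===== PORT B =====
-- literal transliteration of B: boundary indices first, then slice-and-join
def split_by_page_heading_py_alt (md_text : String) : List String :=
  let lines := PySem.Str.splitlines (if md_text == "" then "" else md_text)
  if lines.isEmpty then [] else
    let bounds := [(0 : Int)] ++ (PySem.List.enumerate lines).filterMap
      (fun p => if decide (0 < p.1) && PySem.Str.startswith p.2 "## Page " then some p.1 else none)
    let bounds := bounds ++ [((lines.length : Nat) : Int)]
    (bounds.zip bounds.tail).map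
      (fun ab => PySem.Str.strip (PySem.Str.join "\n" (PySem.List.slice lines (some ab.1) (some ab.2))) ++ "\n")

-- ===== PRECONDITION & SPEC =====
def Spec_split_by_page_heading_py (md_text : String) (out : List String) : Prop := out = split_by_page_heading_py_alt md_text
instance (md_text : String) (out : List String) : Decidable (Spec_split_by_page_heading_py md_text out) := by unfold Spec_split_by_page_heading_py; infer_instance

-- ===== CLAIM (what is proved, stated in full; the proofs are below) =====
def Claim_equal_split_by_page_heading_py : Prop := ∀ (md_text : String), Dom_split_by_page_heading_py md_text → Spec_split_by_page_heading_py md_text (split_by_page_heading_py md_text)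

-- ===== LEMMAS AND PROOFS =====

def pvHd (ln : String) : Bool := PySem.Str.startswith ln "## Page "

def pvF (cur : List String) : String := PySem.Str.strip (PySem.Str.join "\n" cur) ++ "\n"

def pvStepA {α β : Type} (hd : α → Bool) (f : List α → β) (st : List β × List α) (ln : α) : List β × List α :=
  if hd ln && !st.2.isEmpty then (st.1 ++ [f st.2], [ln]) else (st.1, st.2 ++ [ln])

def pvGroup {α : Type} (hd : α → Bool) : List α → List α → List (List α)
  | cur, [] => [cur]
  | cur, ln :: rest => if hd ln then cur :: pvGroup hd [ln] rest else pvGroup hd (cur ++ [ln]) rest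

def pvIdx {α : Type} (hd : α → Bool) : List α → List Nat
  | [] => []
  | x :: xs => (if hd x then [0] else []) ++ (pvIdx hd xs).map (· + 1)

def pvSegs {α : Type} (xs : List α) (bs : List Nat) : List (List α) :=
  (bs.zip bs.tail).map (fun ab => (xs.drop ab.1).take (ab.2 - ab.1))

theorem pvA_loop {α β : Type} (hd : α → Bool) (f : List α → β) (ls : List α) :
    ∀ (chunks : List β) (cur : List α), cur ≠ [] →
    (fun st : List β × List α => if !st.2.isEmpty then st.1 ++ [f st.2] else st.1)
      (ls.foldl (pvStepA hd f) (chunks, cur))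
    = chunks ++ (pvGroup hd cur ls).map f := by
  induction ls with
  | nil =>
      intro chunks cur h
      simp [pvGroup, h]
  | cons ln rest ih =>
      intro chunks cur h
      rw [List.foldl_cons]
      by_cases hh : hd ln = true
      · rw [show pvStepA hd f (chunks, cur) ln = (chunks ++ [f cur], [ln]) by
          simp [pvStepA, hh, h]]
        rw [ih (chunks ++ [f cur]) [ln] (by simp)]
        simp [pvGroup, hh]
      · rw [show pvStepA hd f (chunks, cur) ln = (chunks, cur ++ [ln]) by
          simp [pvStepA, hh]]
        rw [ih chunks (cur ++ [ln]) (by simp)]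
        simp [pvGroup, hh]

theorem pvSegs_cons {α : Type} (xs : List α) (a b : Nat) (bs : List Nat) :
    pvSegs xs (a :: b :: bs) = (xs.drop a).take (b - a) :: pvSegs xs (b :: bs) := by
  simp [pvSegs]

theorem pvSegs_shift {α : Type} (cur ys : List α) (bs : List Nat) :
    pvSegs (cur ++ ys) (bs.map (· + cur.length)) = pvSegs ys bs := by
  unfold pvSegs
  rw [← List.map_tail, List.zip_map, List.map_map]
  apply List.map_congr_left
  intro ab _
  have h1 : ab.1 + cur.length = cur.length + ab.1 := Nat.add_comm _ _
  simp [Prod.map, h1, List.drop_length_add_append]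
  congr 1
  omega

theorem pvSegB {α : Type} (hd : α → Bool) (ls : List α) : ∀ (cur : List α),
    pvSegs (cur ++ ls) (0 :: ((pvIdx hd ls).map (· + cur.length) ++ [cur.length + ls.length]))
    = pvGroup hd cur ls := by
  induction ls with
  | nil =>
      intro cur
      simp [pvSegs, pvIdx, pvGroup]
  | cons ln rest ih =>
      intro cur
      by_cases hh : hd ln = true
      · rw [show pvGroup hd cur (ln :: rest) = cur :: pvGroup hd [ln] rest by simp [pvGroup, hh]]
        have hb : ((pvIdx hd (ln :: rest)).map (· + cur.length) ++ [cur.length + (ln :: rest).length])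
            = (0 :: ((pvIdx hd rest).map (· + 1) ++ [1 + rest.length])).map (· + cur.length) := by
          simp [pvIdx, hh]
          omega
        rw [hb]
        have hc : (((0 : Nat) :: ((pvIdx hd rest).map (· + 1) ++ [1 + rest.length])).map (· + cur.length))
            = cur.length :: (((pvIdx hd rest).map (· + 1) ++ [1 + rest.length]).map (· + cur.length)) := by
          simp
        rw [hc, pvSegs_cons]
        congr 1
        · simp
        · rw [← hc, pvSegs_shift cur (ln :: rest)]
          have h3 := ih [ln]
          simpa using h3
      · rw [Bool.not_eq_true] at hh
        have h2 := ih (cur ++ [ln])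
        have e1 : ((pvIdx hd rest).map (· + 1)).map (· + cur.length)
            = (pvIdx hd rest).map (· + (cur ++ [ln]).length) := by
          rw [List.map_map]
          apply List.map_congr_left
          intro a _
          simp
          omega
        have e2 : cur.length + (ln :: rest).length = (cur ++ [ln]).length + rest.length := by
          simp; omega
        rw [show pvGroup hd cur (ln :: rest) = pvGroup hd (cur ++ [ln]) rest by
          simp [pvGroup, hh]]
        rw [← h2]
        simp only [pvIdx, hh, Bool.false_eq_true, if_false, List.nil_append, e1, e2]
        simp [List.append_assoc]

theorem pvSegB_one {α : Type} (hd : α → Bool) (l : α) (ls : List α) :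
    pvSegs (l :: ls) (0 :: ((pvIdx hd ls).map (· + 1) ++ [1 + ls.length]))
    = pvGroup hd [l] ls := by
  simpa using pvSegB hd ls [l]

theorem pvA_main {α β : Type} (hd : α → Bool) (f : List α → β) (l : α) (ls : List α) :
    (fun st : List β × List α => if !st.2.isEmpty then st.1 ++ [f st.2] else st.1)
      ((l :: ls).foldl (pvStepA hd f) ([], []))
    = (pvGroup hd [l] ls).map f := by
  rw [List.foldl_cons, show pvStepA hd f ([], []) l = ([], [l]) by simp [pvStepA]]
  rw [pvA_loop hd f ls [] [l] (by simp)]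
  simp

theorem pvEnum (xs : List String) : ∀ (s : Nat), 1 ≤ s →
    (PySem.List.enumerate xs ((s : Nat) : Int)).filterMap
      (fun p => if decide (0 < p.1) && PySem.Str.startswith p.2 "## Page " then some p.1 else none)
    = (pvIdx pvHd xs).map (fun k => ((k + s : Nat) : Int)) := by
  induction xs with
  | nil => intro s hs; simp [PySem.List.enumerate_nil, pvIdx]
  | cons x xs ih =>
      intro s hs
      rw [PySem.List.enumerate_cons, List.filterMap_cons]
      have h0 : (0 : Int) < ((s : Nat) : Int) := by exact_mod_cast hs
      have hcast : ((s : Nat) : Int) + 1 = (((s + 1 : Nat)) : Int) := by push_cast; ring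
      rw [hcast]
      have ih1 := ih (s + 1) (by omega)
      by_cases hx : PySem.Str.startswith x "## Page " = true
      · simp only [hx, h0, Bool.and_true, decide_eq_true, if_pos]
        rw [ih1]
        simp only [pvIdx, pvHd, hx, if_pos, List.singleton_append, List.map_cons, List.map_map]
        refine congrArg₂ List.cons (by simp) ?_
        apply List.map_congr_left
        intro a _
        simp only [Function.comp_apply]
        congr 1
        omega
      · simp only [hx, Bool.and_false, if_neg, Bool.false_eq_true, not_false_eq_true]
        rw [ih1]
        simp only [pvIdx, pvHd, hx, Bool.false_eq_true, if_false, List.nil_append, List.map_map]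
        apply List.map_congr_left
        intro a _
        simp only [Function.comp_apply]
        congr 1
        omega

theorem pvCastSegs (xs : List String) (bs : List Nat) :
    (((bs.map (fun n : Nat => (n : Int))).zip ((bs.map (fun n : Nat => (n : Int))).tail)).map
      (fun ab => PySem.Str.strip (PySem.Str.join "\n" (PySem.List.slice xs (some ab.1) (some ab.2))) ++ "\n"))
    = (pvSegs xs bs).map pvF := by
  rw [← List.map_tail, List.zip_map, List.map_map]
  unfold pvSegs
  rw [List.map_map]
  apply List.map_congr_left
  intro ab _
  simp only [Function.comp_apply, Prod.map]
  rw [PySem.List.slice_natCast]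
  rfl

theorem pvBounds (l : String) (ls : List String) :
    ([(0 : Int)] ++ (PySem.List.enumerate (l :: ls)).filterMap
        (fun p => if decide (0 < p.1) && PySem.Str.startswith p.2 "## Page " then some p.1 else none)
      ++ [(((l :: ls).length : Nat) : Int)])
    = (0 :: ((pvIdx pvHd ls).map (· + 1) ++ [1 + ls.length])).map (fun n : Nat => (n : Int)) := by
  rw [PySem.List.enumerate_cons, List.filterMap_cons]
  rw [show (if decide ((0 : Int) < (0, l).1) && PySem.Str.startswith (0, l).2 "## Page "
      then some (0, l).1 else none) = (none : Option Int) by norm_num]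
  rw [show ((0 : Int) + 1) = (((1 : Nat)) : Int) by norm_num]
  rw [pvEnum ls 1 (by norm_num)]
  simp [List.map_map, Function.comp, Nat.add_comm]

theorem pvMainEq (md_text : String) :
    split_by_page_heading_py md_text = split_by_page_heading_py_alt md_text := by
  unfold split_by_page_heading_py split_by_page_heading_py_alt
  have hms : (if md_text == "" then "" else md_text) = md_text := by
    split
    · next h => rw [beq_iff_eq] at h; rw [h]
    · rfl
  rw [hms]
  cases hE : PySem.Str.splitlines md_text with
  | nil => simp
  | cons l ls =>
      simp only [List.isEmpty_cons, Bool.false_eq_true, if_false]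
      refine Eq.trans (pvA_main pvHd pvF l ls) ?_
      rw [← pvSegB_one pvHd l ls, ← pvCastSegs (l :: ls) _, ← pvBounds l ls]

-- ===== VERDICT (by name: the statement is the Claim_ definition above) =====
theorem split_by_page_heading_py_spec : Claim_equal_split_by_page_heading_py := by
  intro md_text _
  unfold Spec_split_by_page_heading_py
  exact pvMainEq md_text
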